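-- pv_equiv track=rewrite | github.com/rtrvale/matrix_rounding | smooth_and_round_array.py | prod_target_matrix
-- ===== SOURCE A (Python) =====
-- def prod_target_matrix(row_sums, col_sums):
--     """
--     organises the row and column sums into a matrix so that the max flow
--     algorithm can be applied.
--
--     Parameters
--     ----------
--     row_sums : list of ints with length (M)
--     col_sums : list of ints with length (N)
--
--     Returns
--     -------
--     array : ndarray with M x N
--     """
--
--     m = len(row_sums)
--     n = len(col_sums)
--     matrix = []
--
--     matrix += [[0] + list(row_sums) + [0] * n + [0]]
--
--     for i in range(m):
--         matrix += [[0] * (m + 1) + [1] * n + [0]]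
--
--     for i in range(n):
--         matrix += [[0] * (m + n + 1) + [col_sums[i]]]
--
--     matrix += [[0] * (m + n + 2)]
--
--     return matrix
-- ===== SOURCE B (Python) =====
-- def prod_target_matrix(row_sums, col_sums):
--     m = len(row_sums)
--     n = len(col_sums)
--     size = m + n + 2
--
--     def entry(r, c):
--         if r == 0 and 1 <= c <= m:
--             return row_sums[c - 1]
--         if 1 <= r <= m and m + 1 <= c <= m + n:
--             return 1
--         if m + 1 <= r <= m + n and c == size - 1:
--             return col_sums[r - m - 1]
--         return 0
--
--     return [[entry(r, c) for c in range(size)] for r in range(size)]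
-- ===== Notes on version B (the rewrite author's own statement) =====
-- stated objective: alternative
-- what changed: B computes each cell of the (m+n+2)x(m+n+2) flow matrix from a closed-form per-coordinate entry function over a preallocated index grid, instead of A's row assembly by concatenating zero/one blocks and appending rows in three loops.
import Mathlib
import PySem

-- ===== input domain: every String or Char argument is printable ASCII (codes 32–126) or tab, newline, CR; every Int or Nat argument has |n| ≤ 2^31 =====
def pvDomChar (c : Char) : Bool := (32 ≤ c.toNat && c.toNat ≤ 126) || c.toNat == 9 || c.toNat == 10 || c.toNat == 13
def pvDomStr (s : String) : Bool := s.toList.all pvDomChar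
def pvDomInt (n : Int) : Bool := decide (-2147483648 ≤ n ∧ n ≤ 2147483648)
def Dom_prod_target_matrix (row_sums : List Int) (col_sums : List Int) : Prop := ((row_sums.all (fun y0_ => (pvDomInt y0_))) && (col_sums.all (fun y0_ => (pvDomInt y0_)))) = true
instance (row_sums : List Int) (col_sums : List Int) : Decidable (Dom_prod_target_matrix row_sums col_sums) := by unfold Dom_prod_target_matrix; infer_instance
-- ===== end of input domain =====

-- B fills a preallocated (m+n+2)² grid from a closed-form per-coordinate entry function
-- instead of assembling each row by concatenating zero/one blocks (objective: alternative).

-- ===== PORT A =====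
def prod_target_matrix (row_sums : List Int) (col_sums : List Int) : List (List Int) :=
  let m : Int := row_sums.length
  let n : Int := col_sums.length
  let matrix : List (List Int) := []
  let matrix := matrix ++ [[0] ++ row_sums ++ PySem.List.pyRepeat [0] n ++ [0]]
  let matrix := (PySem.List.pyRange 0 m 1).foldl
      (fun acc _ => acc ++ [PySem.List.pyRepeat [0] (m + 1) ++ PySem.List.pyRepeat [1] n ++ [0]]) matrix
  let matrix := (PySem.List.pyRange 0 n 1).foldl
      (fun acc i => acc ++ [PySem.List.pyRepeat [0] (m + n + 1) ++ [PySem.List.pyGetD col_sums i 0]]) matrix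
  matrix ++ [PySem.List.pyRepeat [0] (m + n + 2)]

-- ===== PORT B =====
-- the inner 'entry' helper of Source B (r, c are the nonnegative indices produced by range(size))
def pvEntry (row_sums : List Int) (col_sums : List Int) (m n size r c : Nat) : Int :=
  if r = 0 ∧ 1 ≤ c ∧ c ≤ m then row_sums.getD (c - 1) 0
  else if 1 ≤ r ∧ r ≤ m ∧ m + 1 ≤ c ∧ c ≤ m + n then 1
  else if m + 1 ≤ r ∧ r ≤ m + n ∧ c = size - 1 then col_sums.getD (r - m - 1) 0
  else 0

def prod_target_matrix_alt (row_sums : List Int) (col_sums : List Int) : List (List Int) :=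
  let m := row_sums.length
  let n := col_sums.length
  let size := m + n + 2
  (List.range size).map (fun r => (List.range size).map (fun c => pvEntry row_sums col_sums m n size r c))

-- ===== PRECONDITION & SPEC =====
def Spec_prod_target_matrix (row_sums : List Int) (col_sums : List Int) (out : List (List Int)) : Prop := out = prod_target_matrix_alt row_sums col_sums
instance (row_sums : List Int) (col_sums : List Int) (out : List (List Int)) : Decidable (Spec_prod_target_matrix row_sums col_sums out) := by unfold Spec_prod_target_matrix; infer_instance

-- ===== CLAIM (what is proved, stated in full; the proofs are below) =====
def Claim_equal_prod_target_matrix : Prop := ∀ (row_sums : List Int) (col_sums : List Int), Dom_prod_target_matrix row_sums col_sums → Spec_prod_target_matrix row_sums col_sums (prod_target_matrix row_sums col_sums)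

-- ===== LEMMAS AND PROOFS =====

-- canonical block form of the result: the common reduct of both ports
def pvCanon (row col : List Int) : List (List Int) :=
  (0 :: (row ++ (List.replicate col.length 0 ++ [0]))) ::
  (List.replicate row.length
      (List.replicate (row.length + 1) 0 ++ (List.replicate col.length 1 ++ [0])) ++
    ((List.range col.length).map
        (fun j => List.replicate (row.length + col.length + 1) 0 ++ [col.getD j 0]) ++
      [List.replicate (row.length + col.length + 2) 0]))

theorem pv_flatten_map_singleton {α β : Type} (f : α → β) (l : List α) :
    (l.map (fun x => [f x])).flatten = l.map f := by
  induction l with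
  | nil => rfl
  | cons a t ih => simp [ih]

theorem pv_map_range_add {α : Type} (f : Nat → α) (a b : Nat) :
    (List.range (a + b)).map f
      = (List.range a).map f ++ (List.range b).map (fun k => f (a + k)) := by
  rw [List.range_add, List.map_append, List.map_map]
  rfl

-- split a map over range (1 + (m + (n + 1))) into the four semantic segments
theorem pv_map_range_split {α : Type} (g : Nat → α) (m n : Nat) :
    (List.range (1 + (m + (n + 1)))).map g
      = g 0 :: ((List.range m).map (fun k => g (1 + k)) ++
          ((List.range n).map (fun k => g (1 + (m + k))) ++ [g (1 + (m + n))])) := by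
  rw [pv_map_range_add g 1 (m + (n + 1)), pv_map_range_add _ m (n + 1),
    List.range_succ (n := n)]
  simp [List.range_one]

theorem pv_map_getD_range (xs : List Int) :
    (List.range xs.length).map (fun k => xs.getD k 0) = xs := by
  apply List.ext_getElem (by simp)
  intro i h1 h2
  simp [List.getD_eq_getElem?_getD, List.getElem?_eq_getElem h2]

theorem pvA_eq_canon (row col : List Int) : prod_target_matrix row col = pvCanon row col := by
  unfold prod_target_matrix pvCanon
  have h1 : ((row.length : Int) + (col.length : Int) + 1).toNat = row.length + col.length + 1 := by omega
  have h2 : ((row.length : Int) + (col.length : Int) + 2).toNat = row.length + col.length + 2 := by omega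
  simp [PySem.List.pyRepeat_singleton, PySem.List.pyRange_one, List.map_map, Function.comp_def,
        PySem.List.pyGetD_natCast, pv_flatten_map_singleton, h1, h2, List.map_const']

-- the four row shapes of B's grid
theorem pvRow0 (row col : List Int) :
    (List.range (1 + (row.length + (col.length + 1)))).map
        (fun c => pvEntry row col row.length col.length (1 + (row.length + (col.length + 1))) 0 c)
      = 0 :: (row ++ (List.replicate col.length 0 ++ [0])) := by
  rw [pv_map_range_split]
  have hA : ∀ k ∈ List.range row.length,
      pvEntry row col row.length col.length (1 + (row.length + (col.length + 1))) 0 (1 + k)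
        = row.getD k 0 := by
    intro k hk
    rw [List.mem_range] at hk
    unfold pvEntry
    rw [if_pos (by omega)]
    have h : 1 + k - 1 = k := by omega
    rw [h]
  have hB : ∀ k ∈ List.range col.length,
      pvEntry row col row.length col.length (1 + (row.length + (col.length + 1))) 0
          (1 + (row.length + k)) = 0 := by
    intro k _
    unfold pvEntry
    rw [if_neg (by omega), if_neg (by omega), if_neg (by omega)]
  have h0 : pvEntry row col row.length col.length (1 + (row.length + (col.length + 1))) 0 0 = 0 := by
    unfold pvEntry
    rw [if_neg (by omega), if_neg (by omega), if_neg (by omega)]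
  have hL : pvEntry row col row.length col.length (1 + (row.length + (col.length + 1))) 0
      (1 + (row.length + col.length)) = 0 := by
    unfold pvEntry
    rw [if_neg (by omega), if_neg (by omega), if_neg (by omega)]
  rw [List.map_congr_left hA, pv_map_getD_range, List.map_congr_left hB, h0, hL]
  simp [List.map_const']

theorem pvRowBlk (row col : List Int) (i : Nat) (hi : i < row.length) :
    (List.range (1 + (row.length + (col.length + 1)))).map
        (fun c => pvEntry row col row.length col.length (1 + (row.length + (col.length + 1))) (1 + i) c)
      = List.replicate (row.length + 1) 0 ++ (List.replicate col.length 1 ++ [0]) := by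
  rw [pv_map_range_split]
  have hA : ∀ k ∈ List.range row.length,
      pvEntry row col row.length col.length (1 + (row.length + (col.length + 1))) (1 + i) (1 + k)
        = 0 := by
    intro k hk
    rw [List.mem_range] at hk
    unfold pvEntry
    rw [if_neg (by omega), if_neg (by omega), if_neg (by omega)]
  have hB : ∀ k ∈ List.range col.length,
      pvEntry row col row.length col.length (1 + (row.length + (col.length + 1))) (1 + i)
          (1 + (row.length + k)) = 1 := by
    intro k hk
    rw [List.mem_range] at hk
    unfold pvEntry
    rw [if_neg (by omega), if_pos (by omega)]
  have h0 : pvEntry row col row.length col.length (1 + (row.length + (col.length + 1))) (1 + i) 0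
      = 0 := by
    unfold pvEntry
    rw [if_neg (by omega), if_neg (by omega), if_neg (by omega)]
  have hL : pvEntry row col row.length col.length (1 + (row.length + (col.length + 1))) (1 + i)
      (1 + (row.length + col.length)) = 0 := by
    unfold pvEntry
    rw [if_neg (by omega), if_neg (by omega), if_neg (by omega)]
  rw [List.map_congr_left hA, List.map_congr_left hB, h0, hL]
  simp [List.map_const', List.replicate_succ]

theorem pvRowCol (row col : List Int) (j : Nat) (hj : j < col.length) :
    (List.range (1 + (row.length + (col.length + 1)))).map
        (fun c => pvEntry row col row.length col.length (1 + (row.length + (col.length + 1)))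
          (1 + (row.length + j)) c)
      = List.replicate (row.length + col.length + 1) 0 ++ [col.getD j 0] := by
  rw [pv_map_range_split]
  have hA : ∀ k ∈ List.range row.length,
      pvEntry row col row.length col.length (1 + (row.length + (col.length + 1)))
          (1 + (row.length + j)) (1 + k) = 0 := by
    intro k hk
    rw [List.mem_range] at hk
    unfold pvEntry
    rw [if_neg (by omega), if_neg (by omega), if_neg (by omega)]
  have hB : ∀ k ∈ List.range col.length,
      pvEntry row col row.length col.length (1 + (row.length + (col.length + 1)))
          (1 + (row.length + j)) (1 + (row.length + k)) = 0 := by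
    intro k hk
    rw [List.mem_range] at hk
    unfold pvEntry
    rw [if_neg (by omega), if_neg (by omega), if_neg (by omega)]
  have h0 : pvEntry row col row.length col.length (1 + (row.length + (col.length + 1)))
      (1 + (row.length + j)) 0 = 0 := by
    unfold pvEntry
    rw [if_neg (by omega), if_neg (by omega), if_neg (by omega)]
  have hL : pvEntry row col row.length col.length (1 + (row.length + (col.length + 1)))
      (1 + (row.length + j)) (1 + (row.length + col.length)) = col.getD j 0 := by
    unfold pvEntry
    rw [if_neg (by omega), if_neg (by omega), if_pos (by omega)]
    have h : 1 + (row.length + j) - row.length - 1 = j := by omega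
    rw [h]
  rw [List.map_congr_left hA, List.map_congr_left hB, h0, hL,
    List.replicate_succ]
  simp [List.map_const']
  rw [List.replicate_add, List.append_assoc]

theorem pvRowLast (row col : List Int) :
    (List.range (1 + (row.length + (col.length + 1)))).map
        (fun c => pvEntry row col row.length col.length (1 + (row.length + (col.length + 1)))
          (1 + (row.length + col.length)) c)
      = List.replicate (1 + (row.length + (col.length + 1))) 0 := by
  have hA : ∀ c ∈ List.range (1 + (row.length + (col.length + 1))),
      pvEntry row col row.length col.length (1 + (row.length + (col.length + 1)))
          (1 + (row.length + col.length)) c = 0 := by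
    intro c _
    unfold pvEntry
    rw [if_neg (by omega), if_neg (by omega), if_neg (by omega)]
  rw [List.map_congr_left hA]
  simp [List.map_const']

theorem pvB_eq_canon (row col : List Int) : prod_target_matrix_alt row col = pvCanon row col := by
  unfold prod_target_matrix_alt pvCanon
  simp only []
  have hsz : row.length + col.length + 2 = 1 + (row.length + (col.length + 1)) := by omega
  rw [hsz, pv_map_range_split, pvRow0,
    List.map_congr_left (fun i hi => pvRowBlk row col i (List.mem_range.mp hi)),
    List.map_congr_left (fun j hj => pvRowCol row col j (List.mem_range.mp hj)),
    pvRowLast]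
  simp [List.map_const']

-- ===== VERDICT (by name: the statement is the Claim_ definition above) =====
theorem prod_target_matrix_spec : Claim_equal_prod_target_matrix := by
  intro row col _
  unfold Spec_prod_target_matrix
  rw [pvA_eq_canon, pvB_eq_canon]
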